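-- pv_equiv track=rewrite | github.com/wangjw14/Technology-notes | code/ner_utils.py | get_entity_io
-- ===== SOURCE A (Python) =====
-- def get_entity_io(seq, id2label):
--     """Gets entities from sequence.
--     note: IO
--     Args:
--         seq (list): sequence of labels.
--     Returns:
--         list: list of (chunk_type, chunk_start, chunk_end).
--     Example:
--         seq = ['I-PER', 'I-PER', 'O', 'I-LOC', 'I-PER']
--         get_entity_bio(seq)
--         #output
--         [['PER', 0, 1], ['LOC', 3, 3], ['PER', 4, 4]]
--     """
--     if not isinstance(seq[0], str):
--         seq = [id2label[x] for x in seq]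
--     span_list = []
--     span = []
--     type_ = ''
--     for i, x in enumerate(seq):
--         if '-' not in x:
--             if span:
--                 span_list.append(span)
--                 span = []
--         else:
--             if not span:
--                 type_ = x.split('-')[-1]
--                 span = [type_, i, i]
--             else:
--                 if x.split('-')[-1] != type_:
--                     type_ = x.split('-')[-1]
--                     span_list.append(span)
--                     span = [type_, i, i]
--                 else:
--                     span[2] = i
--
--     if span:
--         span_list.append(span)
--
--     # 校验是否多抽或者漏抽
--     num_label = len([x for x in seq if '-' in x])
--     total_span = 0
--     for span in span_list:
--         total_span += span[2] - span[1] + 1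
--
--     assert num_label == total_span, '{} != {}'.format(num_label, total_span)
--
--     return span_list
-- ===== SOURCE B (Python) =====
-- def get_entity_io(seq, id2label):
--     """Run-length grouping re-implementation: map each label to its type key
--     (None for unlabeled), then emit one span per maximal run of equal non-None keys."""
--     if not isinstance(seq[0], str):
--         seq = [id2label[x] for x in seq]
--     keys = [x.split('-')[-1] if '-' in x else None for x in seq]
--     spans = []
--     i, n = 0, len(keys)
--     while i < n:
--         j = i + 1
--         while j < n and keys[j] == keys[i]:
--             j += 1
--         if keys[i] is not None:
--             spans.append([keys[i], i, j - 1])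
--         i = j
--     return spans
-- ===== Notes on version B (the rewrite author's own statement) =====
-- stated objective: alternative
-- what changed: Replaced A's incremental span/type_ state machine (open, extend, close, flush a mutable span) and its assertion pass by precomputing a per-position type-key list and emitting one span per maximal run of equal non-None keys with a two-pointer run scan.
-- outside the precondition, e.g. on get_entity_io([], {}): A raises IndexError, B raises IndexError
import Mathlib
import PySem

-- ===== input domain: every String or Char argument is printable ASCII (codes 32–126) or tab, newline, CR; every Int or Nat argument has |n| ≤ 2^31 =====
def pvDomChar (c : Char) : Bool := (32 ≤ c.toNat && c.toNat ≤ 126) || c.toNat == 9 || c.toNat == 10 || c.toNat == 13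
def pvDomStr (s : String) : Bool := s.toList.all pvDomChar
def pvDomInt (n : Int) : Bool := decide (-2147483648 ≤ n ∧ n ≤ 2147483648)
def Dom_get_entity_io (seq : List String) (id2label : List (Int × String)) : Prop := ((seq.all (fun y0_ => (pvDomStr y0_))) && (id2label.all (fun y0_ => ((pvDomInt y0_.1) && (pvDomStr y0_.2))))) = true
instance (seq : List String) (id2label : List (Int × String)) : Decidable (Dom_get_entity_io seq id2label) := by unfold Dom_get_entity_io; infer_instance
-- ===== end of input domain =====

-- B replaces A's incremental span/type state machine with a precomputed per-position
-- key list and one emitted span per maximal run of equal non-None keys (objective: alternative).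

-- shared tiny helpers: '-' in x   and   x.split('-')[-1]
def hasDash (x : String) : Bool := PySem.Str.isIn "-" x
def pySplitLast (x : String) : String :=
  -- x.split('-')[-1]; split on the nonempty separator "-" is `some` and never empty,
  -- so both defaults are unreachable
  PySem.List.pyGetD ((PySem.Str.split? x "-").getD []) (-1) ""

-- ===== PORT A =====
-- Python A's `if not isinstance(seq[0], str)` indexes seq[0] (IndexError on the empty list,
-- excluded by Pre_) and is False for every String element, so id2label is never consulted.
-- loop body of A (state: span_list, span (empty list = none), type_)
def stepA (st : List (String × Int × Int) × Option (String × Int × Int) × String)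
    (ix : Int × String) : List (String × Int × Int) × Option (String × Int × Int) × String :=
  let (span_list, span, type_) := st
  let (i, x) := ix
  if hasDash x = false then
    match span with
    | some s => (span_list ++ [s], none, type_)
    | none => (span_list, none, type_)
  else
    match span with
    | none =>
        let t := pySplitLast x
        (span_list, some (t, i, i), t)
    | some s =>
        if pySplitLast x ≠ type_ then
          let t := pySplitLast x
          (span_list ++ [s], some (t, i, i), t)
        else
          (span_list, some (s.1, s.2.1, i), type_)

-- trailing `if span: span_list.append(span)`
def finA (st : List (String × Int × Int) × Option (String × Int × Int) × String) :
    List (String × Int × Int) :=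
  st.1 ++ (match st.2.1 with | some s => [s] | none => [])

def get_entity_io (seq : List String) (id2label : List (Int × String)) : List (String × Int × Int) :=
  let st := (PySem.List.enumerate seq 0).foldl stepA ([], none, "")
  let span_list := finA st
  let num_label : Int := ((seq.filter (fun x => hasDash x)).length : Int)
  let total_span : Int := span_list.foldl (fun acc sp => acc + (sp.2.2 - sp.2.1 + 1)) 0
  -- the assert: its failure branch (AssertionError) is never reached (proved below)
  if num_label = total_span then span_list else []

-- ===== PORT B =====
-- x.split('-')[-1] if '-' in x else None
def keyOf (x : String) : Option String :=
  if hasDash x = true then some (pySplitLast x) else none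

-- the outer while over runs: the head of the suffix starts a run; the inner while
-- (advance j past the following equal keys) is the takeWhile length
def runsB : List (Option String) → Int → List (String × Int × Int)
  | [], _ => []
  | k :: rest, i =>
    let m := (rest.takeWhile (fun k' => k' == k)).length
    let tail := runsB (rest.drop m) (i + (m : Int) + 1)
    match k with
    | none => tail
    | some t => (t, i, i + (m : Int)) :: tail
termination_by keys _ => keys.length
decreasing_by simp


def get_entity_io_alt (seq : List String) (id2label : List (Int × String)) : List (String × Int × Int) :=
  runsB (seq.map keyOf) 0

-- ===== PRECONDITION & SPEC =====
-- Pre_ excludes only the empty seq, where Python A raises IndexError on seq[0] (B raises there too).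
def Pre_get_entity_io (seq : List String) (id2label : List (Int × String)) : Prop := seq ≠ []
instance (seq : List String) (id2label : List (Int × String)) : Decidable (Pre_get_entity_io seq id2label) := by unfold Pre_get_entity_io; infer_instance
def pvWitness_get_entity_io : List String × (List (Int × String)) :=
  (["I-PER", "I-PER", "O", "I-LOC", "I-PER"], [])

def Spec_get_entity_io (seq : List String) (id2label : List (Int × String)) (out : List (String × Int × Int)) : Prop := out = get_entity_io_alt seq id2label
instance (seq : List String) (id2label : List (Int × String)) (out : List (String × Int × Int)) : Decidable (Spec_get_entity_io seq id2label out) := by unfold Spec_get_entity_io; infer_instance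

-- ===== CLAIM (what is proved, stated in full; the proofs are below) =====
def Claim_equal_get_entity_io : Prop := ∀ (seq : List String) (id2label : List (Int × String)), Dom_get_entity_io seq id2label → Pre_get_entity_io seq id2label → Spec_get_entity_io seq id2label (get_entity_io seq id2label)

-- ===== LEMMAS AND PROOFS =====

theorem runsB_cons_none (rest : List (Option String)) (j : Int) :
    runsB (none :: rest) j = runsB rest (j + 1) := by
  cases rest with
  | nil => simp [runsB]
  | cons k r =>
    cases k with
    | none =>
        simp only [runsB, List.takeWhile_cons, beq_self_eq_true, if_true, List.length_cons,
          List.drop_succ_cons]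
        congr 1
        push_cast
        ring
    | some t =>
        simp [runsB]

def extendRun (t : String) (s : Int) : Int → List (Option String) → Int → List (String × Int × Int)
  | e, [], _ => [(t, s, e)]
  | e, none :: rest, j => (t, s, e) :: runsB rest (j + 1)
  | e, some t' :: rest, j =>
      if t' = t then extendRun t s j rest (j + 1)
      else (t, s, e) :: runsB (some t' :: rest) j

theorem extendRun_eq (t : String) (s : Int) (rest : List (Option String)) (j : Int) :
    extendRun t s j rest (j + 1)
      = (t, s, j + ((rest.takeWhile (fun k' => k' == some t)).length : Int))
        :: runsB (rest.drop (rest.takeWhile (fun k' => k' == some t)).length)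
             (j + ((rest.takeWhile (fun k' => k' == some t)).length : Int) + 1) := by
  induction rest generalizing j with
  | nil => simp [extendRun, runsB]
  | cons k r ih =>
    cases k with
    | none => simp [extendRun, runsB_cons_none]
    | some t' =>
      by_cases h : t' = t
      · subst h
        rw [extendRun, if_pos rfl, ih (j + 1)]
        simp only [List.takeWhile_cons, beq_self_eq_true, if_true, List.length_cons,
          List.drop_succ_cons]
        congr 1
        · push_cast; ring_nf
        · congr 1; push_cast; ring
      · rw [extendRun, if_neg h]
        have hb : ((some t' : Option String) == some t) = false := by simp [h]
        simp [hb]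

theorem runsB_cons_some (t : String) (rest : List (Option String)) (j : Int) :
    runsB (some t :: rest) j = extendRun t j j rest (j + 1) := by
  rw [extendRun_eq]
  simp [runsB]

theorem foldA_runsB (seq : List String) :
    (∀ (j : Int) (list : List (String × Int × Int)) (t0 : String),
        finA ((PySem.List.enumerate seq j).foldl stepA (list, none, t0))
          = list ++ runsB (seq.map keyOf) j)
  ∧ (∀ (j : Int) (list : List (String × Int × Int)) (t : String) (s e : Int),
        finA ((PySem.List.enumerate seq j).foldl stepA (list, some (t, s, e), t))
          = list ++ extendRun t s e (seq.map keyOf) j) := by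
  induction seq with
  | nil => simp [finA, extendRun, runsB]
  | cons x xs ih =>
    constructor
    · intro j list t0
      rw [PySem.List.enumerate_cons, List.foldl_cons]
      by_cases h : hasDash x
      · show finA (List.foldl stepA (stepA (list, none, t0) (j, x)) _) = _
        simp only [stepA, h, if_neg (by simp : ¬ (true = false))]
        rw [ih.2 (j + 1) list (pySplitLast x) j j]
        simp [keyOf, h, runsB_cons_some]
      · rw [Bool.not_eq_true] at h
        show finA (List.foldl stepA (stepA (list, none, t0) (j, x)) _) = _
        simp only [stepA, h, if_true]
        rw [ih.1 (j + 1) list t0]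
        simp [keyOf, h, runsB_cons_none]
    · intro j list t s e
      rw [PySem.List.enumerate_cons, List.foldl_cons]
      by_cases h : hasDash x
      · by_cases ht : pySplitLast x = t
        · show finA (List.foldl stepA (stepA (list, some (t, s, e), t) (j, x)) _) = _
          simp only [stepA, h, if_neg (by simp : ¬ (true = false)), ht, ne_eq,
            not_true_eq_false, if_false]
          rw [ih.2 (j + 1) list t s j]
          simp [extendRun, keyOf, h, ht]
        · show finA (List.foldl stepA (stepA (list, some (t, s, e), t) (j, x)) _) = _
          simp only [stepA, h, if_neg (by simp : ¬ (true = false)), ne_eq, ht,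
            not_false_eq_true, if_pos]
          rw [ih.2 (j + 1) (list ++ [(t, s, e)]) (pySplitLast x) j j]
          simp [extendRun, keyOf, h, ht, runsB_cons_some]
      · rw [Bool.not_eq_true] at h
        show finA (List.foldl stepA (stepA (list, some (t, s, e), t) (j, x)) _) = _
        simp only [stepA, h, if_true]
        rw [ih.1 (j + 1) (list ++ [(t, s, e)]) t]
        simp [extendRun, keyOf, h]

theorem sum_runsB : ∀ (n : Nat) (keys : List (Option String)) (j : Int), keys.length ≤ n →
    ((runsB keys j).map (fun sp => sp.2.2 - sp.2.1 + 1)).sum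
      = (keys.countP (fun k => k.isSome) : Int) := by
  intro n
  induction n with
  | zero =>
    intro keys j h
    have : keys = [] := List.length_eq_zero_iff.mp (Nat.le_zero.mp h)
    subst this; simp [runsB]
  | succ n ih =>
    intro keys j h
    cases keys with
    | nil => simp [runsB]
    | cons k rest =>
      obtain ⟨tl, htl⟩ := List.takeWhile_prefix (p := fun k' => k' == k) (l := rest)
      have hdrop : rest.drop (rest.takeWhile (fun k' => k' == k)).length = tl := by
        have h2 := congrArg (List.drop (rest.takeWhile (fun k' => k' == k)).length) htl
        rw [List.drop_left] at h2
        exact h2.symm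
      have hrest : rest.length ≤ n := by simpa using Nat.succ_le_succ_iff.mp h
      have hd : (rest.drop (rest.takeWhile (fun k' => k' == k)).length).length ≤ n := by
        simp; omega
      have htake : ∀ a ∈ rest.takeWhile (fun k' => k' == k), a = k := by
        intro a ha
        have := List.mem_takeWhile_imp ha
        simpa using this
      have hcount : rest.countP (fun k' => Option.isSome k')
          = (rest.takeWhile (fun k' => k' == k)).countP (fun k' => Option.isSome k')
            + tl.countP (fun k' => Option.isSome k') := by
        have h2 := congrArg (List.countP (fun k' => Option.isSome k')) htl
        rw [List.countP_append] at h2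
        exact h2.symm
      have htcount : (rest.takeWhile (fun k' => k' == k)).countP (fun k' => Option.isSome k')
          = if k.isSome then (rest.takeWhile (fun k' => k' == k)).length else 0 := by
        by_cases hk : k.isSome
        · rw [if_pos hk]
          apply List.countP_eq_length.mpr
          intro a ha; rw [htake a ha]; simpa using hk
        · rw [if_neg hk]
          apply List.countP_eq_zero.mpr
          intro a ha; rw [htake a ha]; simpa using hk
      cases k with
      | none =>
        simp only [runsB]
        simp only [Option.isSome_none, Bool.false_eq_true, if_false] at htcount
        rw [ih _ _ hd, hdrop]
        simp only [List.countP_cons, Option.isSome_none, hcount, htcount]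
        push_cast
        ring_nf
      | some t =>
        simp only [runsB, List.map_cons, List.sum_cons]
        rw [ih _ _ hd, hdrop]
        simp only [Option.isSome_some, if_true] at htcount
        simp only [List.countP_cons, Option.isSome_some, hcount, htcount]
        push_cast
        ring_nf

theorem foldl_spanlen (l : List (String × Int × Int)) (a : Int) :
    l.foldl (fun acc sp => acc + (sp.2.2 - sp.2.1 + 1)) a
      = a + (l.map (fun sp => sp.2.2 - sp.2.1 + 1)).sum := by
  induction l generalizing a with
  | nil => simp
  | cons x xs ih => simp [ih]; ring

theorem countP_keys (seq : List String) :
    (seq.map keyOf).countP (fun k => k.isSome)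
      = (seq.filter (fun x => hasDash x)).length := by
  rw [List.countP_map, ← List.countP_eq_length_filter]
  apply List.countP_congr
  intro x _
  simp only [Function.comp, keyOf]
  by_cases h : hasDash x <;> simp [h]

-- ===== VERDICT (by name: the statement is the Claim_ definition above) =====
theorem get_entity_io_spec : Claim_equal_get_entity_io := by
  intro seq id2label _ _
  show get_entity_io seq id2label = get_entity_io_alt seq id2label
  unfold get_entity_io get_entity_io_alt
  have hC := (foldA_runsB seq).1 0 [] ""
  simp only [hC, List.nil_append]
  rw [foldl_spanlen, zero_add, sum_runsB (seq.map keyOf).length _ _ (le_refl _), countP_keys]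
  simp
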